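-- pv_equiv track=rewrite | github.com/MrBrantCode/unitest_baseline | mut_generate/mist_train_cf/cf_73123/solution.py | cubed_product
-- ===== SOURCE A (Python) =====
-- def cubed_product(lst):
--     """
--     Function to calculate the product of cubical values of the elements from a list.
--     """
--     try:
--         # Initialize the product as 1 (neutral element for multiplication)
--         product = 1
--
--         # Iterate through the list
--         for num in lst:
--
--             # Check if the number is an integer and between -10 and 10
--             if type(num) != int or num < -10 or num > 10:
--                 return "Invalid input: All elements should be integers between -10 and 10."
--
--             # Cube the number and multiply it with the product
--             product *= num ** 3
--
--         # Return the final product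
--         return product
--     except Exception as e:
--         # In case of any other exception, print the exception message
--         return f"An error occurred: {e}"
-- ===== SOURCE B (Python) =====
-- def cubed_product(lst):
--     """
--     Frequency-table version: tally how many times each value occurs, then
--     multiply each distinct value raised to the power 3*count.
--     """
--     try:
--         counts = {}
--         for num in lst:
--             if type(num) != int or num < -10 or num > 10:
--                 return "Invalid input: All elements should be integers between -10 and 10."
--             counts[num] = counts.get(num, 0) + 1
--         product = 1
--         for value, count in counts.items():
--             product *= value ** (3 * count)
--         return product
--     except Exception as e:
--         return f"An error occurred: {e}"
-- ===== Notes on version B (the rewrite author's own statement) =====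
-- stated objective: alternative
-- what changed: Instead of A's single multiply-as-you-go accumulator, B builds a frequency table of the (at most 21) distinct values and computes the product as value**(3*count) per distinct value via fast exponentiation.
import Mathlib
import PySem

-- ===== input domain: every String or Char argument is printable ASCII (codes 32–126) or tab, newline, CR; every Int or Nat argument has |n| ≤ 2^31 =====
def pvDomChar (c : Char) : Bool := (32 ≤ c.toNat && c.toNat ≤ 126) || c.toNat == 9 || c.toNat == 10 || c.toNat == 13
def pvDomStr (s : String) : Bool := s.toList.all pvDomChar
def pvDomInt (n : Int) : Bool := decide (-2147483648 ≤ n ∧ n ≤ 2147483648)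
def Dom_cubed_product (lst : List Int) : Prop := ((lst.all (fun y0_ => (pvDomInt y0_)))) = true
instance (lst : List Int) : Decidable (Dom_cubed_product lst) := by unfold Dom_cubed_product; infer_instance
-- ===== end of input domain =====

-- B replaces A's fused multiply-as-you-go loop by a frequency table: tally the distinct
-- values, then multiply value^(3*count) per distinct value (alternative decomposition).

-- ===== PORT A =====
-- A's loop: one pass, running product, early return on an invalid element
-- (the early `return <string>` path lies outside Pre_; the port returns 0 there).
def cubedLoopA : List Int → Int → Int
  | [], product => product
  | num :: rest, product =>
    if num < -10 ∨ num > 10 then 0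
    else cubedLoopA rest (product * num ^ 3)

def cubed_product (lst : List Int) : Int := cubedLoopA lst 1

-- ===== PORT B =====
-- B pass 1: validate and tally counts[num] = counts.get(num, 0) + 1
-- (the string-returning invalid branch lies outside Pre_; the port yields none, mapped to 0).
def tallyLoopB : List Int → PySem.Dict Int Int → Option (PySem.Dict Int Int)
  | [], counts => some counts
  | num :: rest, counts =>
    if num < -10 ∨ num > 10 then none
    else tallyLoopB rest (counts.insert num (counts.getD num 0 + 1))

-- B pass 2: product over counts.items() of value ** (3*count); the count is a Python int
-- (Int here) that is always ≥ 1, so `(3 * count).toNat` as the exponent is exact.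
def cubed_product_alt (lst : List Int) : Int :=
  match tallyLoopB lst PySem.Dict.empty with
  | none => 0
  | some counts => counts.items.foldl (fun product kv => product * kv.1 ^ (3 * kv.2).toNat) 1

-- ===== PRECONDITION & SPEC =====
-- Pre_ excludes lists with an element outside the range -10..10: there A (and B) return an error
-- STRING, not a value of the declared Int type.
def Pre_cubed_product (lst : List Int) : Prop := ∀ n ∈ lst, -10 ≤ n ∧ n ≤ 10
instance (lst : List Int) : Decidable (Pre_cubed_product lst) := by unfold Pre_cubed_product; infer_instance
def pvWitness_cubed_product : List Int := [1, -2, 10]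

def Spec_cubed_product (lst : List Int) (out : Int) : Prop := out = cubed_product_alt lst
instance (lst : List Int) (out : Int) : Decidable (Spec_cubed_product lst out) := by unfold Spec_cubed_product; infer_instance

-- ===== CLAIM (what is proved, stated in full; the proofs are below) =====
def Claim_equal_cubed_product : Prop := ∀ (lst : List Int), Dom_cubed_product lst → Pre_cubed_product lst → Spec_cubed_product lst (cubed_product lst)

-- ===== LEMMAS AND PROOFS =====

-- A's loop on valid input is the product of cubes.
theorem cubedLoopA_valid (t : List Int) (p : Int)
    (h : ∀ n ∈ t, -10 ≤ n ∧ n ≤ 10) :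
    cubedLoopA t p = p * (t.map (fun n => n ^ 3)).prod := by
  induction t generalizing p with
  | nil => simp [cubedLoopA]
  | cons a t ih =>
    have ha := h a (List.mem_cons_self ..)
    have ht : ∀ n ∈ t, -10 ≤ n ∧ n ≤ 10 := fun n hn => h n (List.mem_cons_of_mem _ hn)
    simp only [cubedLoopA]
    rw [if_neg (by omega), ih _ ht]
    simp [List.prod_cons]; ring

-- B's tally loop on valid input is the counting fold.
theorem tallyLoopB_valid (t : List Int) (d : PySem.Dict Int Int)
    (h : ∀ n ∈ t, -10 ≤ n ∧ n ≤ 10) :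
    tallyLoopB t d = some (t.foldl (fun d x => d.insert x (d.getD x 0 + 1)) d) := by
  induction t generalizing d with
  | nil => simp [tallyLoopB]
  | cons a t ih =>
    have ha := h a (List.mem_cons_self ..)
    simp only [tallyLoopB]
    rw [if_neg (by omega), ih _ (fun n hn => h n (List.mem_cons_of_mem _ hn))]
    simp [List.foldl_cons]

-- grouping: the product of f over a list equals the product of f x ^ count x over
-- its distinct values (first occurrences).
theorem prod_ofList_pow_count (xs : List Int) (f : Int → Int) :
    ((PySem.Set.ofList xs).map (fun k => f k ^ xs.count k)).prod
      = (xs.map f).prod := by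
  have hnd : (PySem.Set.ofList xs).Nodup := PySem.Set.nodup_ofList xs
  have htf : (PySem.Set.ofList xs).toFinset = xs.toFinset := by
    ext x
    simp [List.mem_toFinset, PySem.Set.mem_ofList]
  calc ((PySem.Set.ofList xs).map (fun k => f k ^ xs.count k)).prod
      = ∏ m ∈ (PySem.Set.ofList xs).toFinset, f m ^ xs.count m :=
        (List.prod_toFinset _ hnd).symm
    _ = ∏ m ∈ (xs : Multiset Int).toFinset, f m ^ (xs : Multiset Int).count m := by
        rw [htf]; simp [Multiset.coe_count]
    _ = ((xs : Multiset Int).map f).prod :=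
        (Finset.prod_multiset_map_count _ _).symm
    _ = (xs.map f).prod := by simp

-- ===== VERDICT (by name: the statement is the Claim_ definition above) =====
theorem cubed_product_spec : Claim_equal_cubed_product := by
  intro lst _ hpre
  unfold Spec_cubed_product cubed_product cubed_product_alt
  rw [tallyLoopB_valid lst PySem.Dict.empty hpre]
  rw [PySem.Dict.foldl_insert_getD_add_one_eq_counter]
  simp only [PySem.Dict.items_counter]
  rw [cubedLoopA_valid lst 1 hpre, one_mul]
  simp only [List.foldl_map]
  symm
  have hToNat : ∀ k : Int, (3 * (lst.count k : Int)).toNat = 3 * lst.count k := by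
    intro k; omega
  calc ((PySem.Set.ofList lst)).foldl
        (fun product k => product * k ^ (3 * (lst.count k : Int)).toNat) 1
      = ((PySem.Set.ofList lst).map (fun k => k ^ (3 * lst.count k))).prod := by
        rw [List.prod_eq_foldl, List.foldl_map]
        simp only [hToNat]
    _ = ((PySem.Set.ofList lst).map (fun k => (k ^ 3) ^ lst.count k)).prod := by
        simp [pow_mul]
    _ = (lst.map (fun n => n ^ 3)).prod := prod_ofList_pow_count lst (fun n => n ^ 3)
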